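-- pv_equiv track=rewrite | github.com/shashanknamdeo/Python | DSA/DSAProblems/GreedyGoogleSheatProblems.py | minCost
-- ===== SOURCE A (Python) =====
-- def minCost(coin, n, k):
--     """
--     """
--     coin.sort()
--     #
--     price = 0
--     #
--     while coin:
--         price += coin.pop(0)
--         temp = k
--         while temp and coin:
--             coin.pop()
--             temp -= 1
--     #
--     return price
-- ===== SOURCE B (Python) =====
-- # B: closed form — after sorting, the picks are exactly the first ceil(len/(k+1))
-- # cheapest coins, so sum a prefix instead of simulating pops.
-- # Note: A sorts/empties `coin` in place; B does not mutate (return value equivalence only).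
-- def minCost(coin, n, k):
--     s = sorted(coin)
--     m = -(-len(s) // (k + 1))
--     return sum(s[:m])
-- ===== Notes on version B (the rewrite author's own statement) =====
-- stated objective: faster
-- what changed: Replace A's quadratic pop(0)/pop() simulation with a closed form: after sorting, the kept coins are exactly the first ceil(len/(k+1)) elements, so B sums that prefix directly.
-- outside the precondition, e.g. on minCost([3, 1, 2], 3, -1): A returns 1, B raises ZeroDivisionError; on minCost([3, 1, 2], 3, -2): A returns 1, B returns 0
import Mathlib
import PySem

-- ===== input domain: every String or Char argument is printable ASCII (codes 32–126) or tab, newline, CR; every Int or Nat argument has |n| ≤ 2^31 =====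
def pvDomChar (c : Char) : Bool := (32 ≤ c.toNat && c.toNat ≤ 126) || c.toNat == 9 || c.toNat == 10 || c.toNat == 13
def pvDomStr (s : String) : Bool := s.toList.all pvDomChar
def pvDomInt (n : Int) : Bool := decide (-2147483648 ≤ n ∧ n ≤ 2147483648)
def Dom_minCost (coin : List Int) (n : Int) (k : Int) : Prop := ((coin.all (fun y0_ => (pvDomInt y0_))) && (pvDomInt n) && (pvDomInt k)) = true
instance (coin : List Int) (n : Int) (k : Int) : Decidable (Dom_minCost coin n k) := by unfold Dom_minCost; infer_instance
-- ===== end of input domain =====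

-- B replaces A's quadratic pop(0)/pop() simulation with a closed form (sum of a sorted
-- prefix); A sorts/empties `coin` in place, B does not mutate — return values only.

-- ===== PORT A =====
-- inner loop: `while temp and coin: coin.pop(); temp -= 1`
def pvInnerA (coin : List Int) (temp : Int) : List Int :=
  if temp ≠ 0 ∧ coin ≠ [] then pvInnerA coin.dropLast (temp - 1) else coin
termination_by coin.length
decreasing_by
  rename_i h
  have : 0 < coin.length := List.length_pos_of_ne_nil h.2
  simp [List.length_dropLast]; omega

theorem pvInnerA_length_le (coin : List Int) (temp : Int) :
    (pvInnerA coin temp).length ≤ coin.length := by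
  fun_induction pvInnerA coin temp with
  | case1 coin temp h ih =>
      calc (pvInnerA coin.dropLast (temp - 1)).length ≤ coin.dropLast.length := ih
        _ ≤ coin.length := by simp [List.length_dropLast]
  | case2 => exact le_refl _

-- outer loop: `while coin: price += coin.pop(0); …`
def pvOuterA (k : Int) (coin : List Int) (price : Int) : Int :=
  match coin with
  | [] => price
  | c :: rest => pvOuterA k (pvInnerA rest k) (price + c)
termination_by coin.length
decreasing_by
  have := pvInnerA_length_le rest k
  simp; omega

def minCost (coin : List Int) (n : Int) (k : Int) : Int :=
  pvOuterA k (PySem.List.sorted coin (fun x => x) false) 0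

-- ===== PORT B =====
def minCost_alt (coin : List Int) (n : Int) (k : Int) : Int :=
  let s := PySem.List.sorted coin (fun x => x) false
  let m := -(PySem.Int.floordiv (-(s.length : Int)) (k + 1))
  (PySem.List.slice s none (some m)).sum

-- ===== PRECONDITION & SPEC =====
-- Pre_ restricts to the natural domain k ≥ 0 (a discard COUNT): for negative k,
-- A's `while temp` never sees 0 and empties the list after the first pick
-- (returning the minimum), while B's ceiling division raises or returns 0.
def Pre_minCost (coin : List Int) (n : Int) (k : Int) : Prop := 0 ≤ k
instance (coin : List Int) (n : Int) (k : Int) : Decidable (Pre_minCost coin n k) := by unfold Pre_minCost; infer_instance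
def pvWitness_minCost : List Int × Int × Int := ([3, 1, 2], 3, 1)

def Spec_minCost (coin : List Int) (n : Int) (k : Int) (out : Int) : Prop := out = minCost_alt coin n k
instance (coin : List Int) (n : Int) (k : Int) (out : Int) : Decidable (Spec_minCost coin n k out) := by unfold Spec_minCost; infer_instance

-- ===== CLAIM (what is proved, stated in full; the proofs are below) =====
def Claim_equal_minCost : Prop := ∀ (coin : List Int) (n : Int) (k : Int), Dom_minCost coin n k → Pre_minCost coin n k → Spec_minCost coin n k (minCost coin n k)

-- ===== LEMMAS AND PROOFS =====

-- inner loop drops min(temp, length) elements from the back: it is `take (len - temp)`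
theorem pvInnerA_eq_take (coin : List Int) (temp : Int) (ht : 0 ≤ temp) :
    pvInnerA coin temp = coin.take (coin.length - temp.toNat) := by
  fun_induction pvInnerA coin temp with
  | case1 coin temp h ih =>
      have htne : temp ≠ 0 := h.1
      have ht' : 0 ≤ temp - 1 := by omega
      rcases List.eq_nil_or_concat coin with rfl | ⟨l, a, rfl⟩
      · exact absurd rfl h.2
      · rw [List.concat_eq_append] at ih ⊢
        rw [List.dropLast_concat] at ih ⊢
        rw [ih ht']
        have hle : (l ++ [a]).length - temp.toNat ≤ l.length := by simp; omega
        rw [List.take_append_of_le_length hle]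
        congr 1
        simp; omega
  | case2 coin temp h =>
      by_cases hc : coin = []
      · simp [hc]
      · have : temp = 0 := by tauto
        simp [this]

-- the number of picks: ceil((r+1)/(K+1)) = ceil((r ∸ K)/(K+1)) + 1, in floor form
theorem pv_pick_count (r K : Nat) :
    (r + 1 + K) / (K + 1) = ((r - K) + K) / (K + 1) + 1 := by
  by_cases h : K ≤ r
  · have h1 : r - K + K = r := Nat.sub_add_cancel h
    have h2 : r + 1 + K = r + (K + 1) := by omega
    rw [h1, h2, Nat.add_div_right _ (by omega)]
  · have h1 : r - K = 0 := by omega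
    have h2 : (r + 1 + K) / (K + 1) = 1 :=
      Nat.div_eq_of_lt_le (k := 1) (n := K + 1) (m := r + 1 + K) (by omega) (by omega)
    rw [h1, h2, Nat.zero_add, Nat.div_eq_of_lt (by omega)]

-- ceil(x/(K+1)) ≤ x
theorem pv_ceil_le (x K : Nat) : (x + K) / (K + 1) ≤ x := by
  rcases Nat.eq_zero_or_pos x with rfl | hx
  · simp [Nat.div_eq_of_lt (Nat.lt_succ_self K)]
  · apply Nat.div_le_of_le_mul
    calc x + K ≤ x + K * x := by
          have : K * 1 ≤ K * x := Nat.mul_le_mul_left K hx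
          omega
      _ = (K + 1) * x := by ring

-- the outer loop sums the first ceil(len/(k+1)) elements
theorem pvOuterA_eq (k : Int) (hk : 0 ≤ k) (s : List Int) (p : Int) :
    pvOuterA k s p = p + (s.take ((s.length + k.toNat) / (k.toNat + 1))).sum := by
  fun_induction pvOuterA k s p with
  | case1 => simp
  | case2 p c rest ih =>
      rw [ih, pvInnerA_eq_take rest k hk]
      have hlen : (rest.take (rest.length - k.toNat)).length = rest.length - k.toNat := by
        simp
      rw [hlen]
      set K := k.toNat with hK
      set r := rest.length with hr
      have hm' : ((r - K) + K) / (K + 1) ≤ r - K := pv_ceil_le (r - K) K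
      rw [List.take_take, Nat.min_eq_left hm']
      have hM : (c :: rest).length + K = r + 1 + K := by simp [hr]
      rw [hM, pv_pick_count r K, List.take_succ_cons, List.sum_cons]
      ring

-- B's ceiling division equals the Nat floor form used above
theorem pv_ceil_div_eq (L K : Nat) (k : Int) (hk : 0 ≤ k) (hKk : (K : Int) = k) :
    -(PySem.Int.floordiv (-(L : Int)) (k + 1)) = (((L + K) / (K + 1) : Nat) : Int) := by
  rw [PySem.Int.neg_floordiv_neg_eq_iff_of_pos (show (0:Int) < k + 1 by omega)]
  set M := (L + K) / (K + 1) with hM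
  have h1 : M * (K + 1) ≤ L + K := Nat.div_mul_le_self _ _
  have h2 : L + K < (M + 1) * (K + 1) := by
    have hmod : (L + K) % (K + 1) < K + 1 := Nat.mod_lt _ (by omega)
    have hdm := Nat.div_add_mod (L + K) (K + 1)
    calc L + K = (K + 1) * M + (L + K) % (K + 1) := hdm.symm
      _ < (K + 1) * M + (K + 1) := by omega
      _ = (M + 1) * (K + 1) := by ring
  constructor
  · have h1' := h1
    push_cast at h1' ⊢
    nlinarith [h1']
  · have h2' := h2
    push_cast at h2' ⊢
    nlinarith [h2']

-- ===== VERDICT (by name: the statement is the Claim_ definition above) =====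
theorem minCost_spec : Claim_equal_minCost := by
  intro coin n k _ hk
  unfold Spec_minCost minCost minCost_alt
  dsimp only
  set s := PySem.List.sorted coin (fun x => x) false with hs
  rw [pvOuterA_eq k hk s 0, zero_add]
  have hKk : ((k.toNat : Int)) = k := Int.toNat_of_nonneg hk
  rw [pv_ceil_div_eq s.length k.toNat k hk hKk]
  rw [PySem.List.slice_to _ (by positivity)]
  rw [Int.toNat_natCast]
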